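-- pv_equiv track=rewrite | github.com/imymemineyay/Baekjoon-Online-judge-PDF- | 프로그래머스/0/181881. 조건에 맞게 수열 변환하기 2/조건에 맞게 수열 변환하기 2.py | solution
-- ===== SOURCE A (Python) =====
-- def solution(arr):
--     answer = 0
--     arr_present = arr.copy()
--     arr_after = arr_present.copy()
--     while True:
--         for idx, num in enumerate(arr_after):
--             if num >= 50 and num % 2 == 0 :
--                 arr_after[idx] = num % 2
--             elif num < 50 and num % 2 != 0 :
--                 arr_after[idx] = (num * 2) + 1
--         if arr_present == arr_after :
--             return answer
--         else :
--             arr_present = arr_after.copy()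
--             answer+= 1
-- ===== SOURCE B (Python) =====
-- def solution(arr):
--     # Each element evolves independently; the number of whole-array passes A
--     # counts equals the maximum number of per-element transform steps.
--     best = 0
--     for num in arr:
--         n = num
--         c = 0
--         while True:
--             if n >= 50 and n % 2 == 0:
--                 nxt = n % 2
--             elif n < 50 and n % 2 != 0:
--                 nxt = n * 2 + 1
--             else:
--                 nxt = n
--             if nxt == n:
--                 break
--             n = nxt
--             c += 1
--         best = max(best, c)
--     return best
-- ===== Notes on version B (the rewrite author's own statement) =====
-- stated objective: alternative
-- what changed: Replaces A's repeated whole-array passes with snapshot comparison by a single pass that runs each element's transform chain independently and returns the maximum per-element step count.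
import Mathlib
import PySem

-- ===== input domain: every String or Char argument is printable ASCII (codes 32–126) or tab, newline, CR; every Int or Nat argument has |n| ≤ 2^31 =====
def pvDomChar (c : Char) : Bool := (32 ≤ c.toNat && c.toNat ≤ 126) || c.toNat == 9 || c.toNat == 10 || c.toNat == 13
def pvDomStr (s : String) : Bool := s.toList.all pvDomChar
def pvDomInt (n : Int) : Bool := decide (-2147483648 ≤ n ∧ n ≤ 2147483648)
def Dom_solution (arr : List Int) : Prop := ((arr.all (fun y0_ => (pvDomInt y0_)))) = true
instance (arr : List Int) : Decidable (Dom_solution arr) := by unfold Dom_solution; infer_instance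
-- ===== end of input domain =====

-- B replaces A's repeated whole-array passes (compared pass-by-pass against a snapshot)
-- with a single pass computing each element's independent transform-step count and taking the maximum.


-- ===== PORT A =====
-- one in-place pass of A's for-loop (each index is read before it is written, so it is a pointwise map)
def stepA (n : Int) : Int :=
  if 50 ≤ n ∧ PySem.Int.mod n 2 = 0 then PySem.Int.mod n 2
  else if n < 50 ∧ PySem.Int.mod n 2 ≠ 0 then n * 2 + 1
  else n

-- A's `while True` loop; the fuel argument only makes the recursion total (64 is never
-- exhausted on inputs satisfying Pre_solution, where at most 6 passes occur)
def loopA : Nat → List Int → List Int → Int → Int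
  | 0, _, _, ans => ans
  | f + 1, pres, after, ans =>
    let after' := after.map stepA
    if pres = after' then ans else loopA f after' after' (ans + 1)

def solution (arr : List Int) : Int := loopA 64 arr arr 0

-- ===== PORT B =====
-- B's inner `while True` for one element: apply the transform, count actual changes.
-- The fuel argument only makes the recursion total (never exhausted under Pre_solution).
def stepsB : Nat → Int → Int → Int
  | 0, _, c => c
  | f + 1, n, c =>
    let nxt := if 50 ≤ n ∧ PySem.Int.mod n 2 = 0 then PySem.Int.mod n 2
               else if n < 50 ∧ PySem.Int.mod n 2 ≠ 0 then n * 2 + 1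
               else n
    if nxt = n then c else stepsB f nxt (c + 1)

def solution_alt (arr : List Int) : Int :=
  arr.foldl (fun best num => max best (stepsB 64 num 0)) 0

-- ===== PRECONDITION & SPEC =====
-- Pre_ excludes exactly the inputs on which Python A never returns: an element that is
-- odd and ≤ -2 is mapped to 2n+1 forever (strictly decreasing), so the loop never stabilises.
def Pre_solution (arr : List Int) : Prop :=
  ∀ x ∈ arr, PySem.Int.mod x 2 ≠ 0 → -1 ≤ x
instance (arr : List Int) : Decidable (Pre_solution arr) := by unfold Pre_solution; infer_instance

def pvWitness_solution : List Int := [1, 100, -1, 7, 0, 51]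

def Spec_solution (arr : List Int) (out : Int) : Prop := out = solution_alt arr
instance (arr : List Int) (out : Int) : Decidable (Spec_solution arr out) := by unfold Spec_solution; infer_instance

-- ===== CLAIM (what is proved, stated in full; the proofs are below) =====
def Claim_equal_solution : Prop := ∀ (arr : List Int), Dom_solution arr → Pre_solution arr → Spec_solution arr (solution arr)

-- ===== LEMMAS AND PROOFS =====

def elemPre (x : Int) : Prop := PySem.Int.mod x 2 ≠ 0 → -1 ≤ x

-- fuel-free spec of the number of transform steps x needs before stabilising (6 suffices under Pre_)
def cntN : Nat → Int → Nat
  | 0, _ => 0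
  | f + 1, x => if stepA x = x then 0 else cntN f (stepA x) + 1

def cnt (x : Int) : Nat := cntN 6 x

def KN (arr : List Int) : Nat := arr.foldl (fun b x => max b (cnt x)) 0

theorem stepA_eq (n : Int) : stepA n =
    if 50 ≤ n ∧ n % 2 = 0 then n % 2
    else if n < 50 ∧ n % 2 ≠ 0 then n * 2 + 1
    else n := by
  simp only [stepA, PySem.Int.mod_eq_emod_of_pos (show (0:Int) < 2 by norm_num)]

theorem stable_iter (x : Int) (h : stepA x = x) : ∀ k : Nat, stepA^[k] x = x := by
  intro k
  induction k with
  | zero => rfl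
  | succ k ih => rw [Function.iterate_succ_apply, h, ih]

theorem stable_persist (x : Int) (k : Nat) (h : stepA (stepA^[k] x) = stepA^[k] x) :
    ∀ d : Nat, stepA^[k + d] x = stepA^[k] x := by
  intro d
  rw [Nat.add_comm, Function.iterate_add_apply]
  exact stable_iter _ h d

theorem L5 (x : Int) (hx : elemPre x) : stepA (stepA^[5] x) = stepA^[5] x := by
  by_cases he : x % 2 = 0
  · by_cases h50 : 50 ≤ x
    · have h1 : stepA x = 0 := by rw [stepA_eq]; simp [h50, he]
      have h0 : stepA (0 : Int) = 0 := by decide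
      have h2 : stepA^[5] x = 0 := by
        rw [show (5 : Nat) = 4 + 1 from rfl, Function.iterate_add_apply,
          Function.iterate_one, h1, stable_iter 0 h0]
      rw [h2, h0]
    · have h1 : stepA x = x := by rw [stepA_eq]; simp [h50, he]
      rw [stable_iter x h1, h1]
  · have hx1 : -1 ≤ x := by
      apply hx
      rw [PySem.Int.mod_eq_emod_of_pos (show (0:Int) < 2 by norm_num)]
      exact he
    by_cases h50 : 50 ≤ x
    · have h1 : stepA x = x := by
        rw [stepA_eq]; simp [he, show ¬ x < 50 by omega]
      rw [stable_iter x h1, h1]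
    · by_cases hm1 : x = -1
      · subst hm1
        have h1 : stepA (-1 : Int) = -1 := by decide
        rw [stable_iter _ h1, h1]
      · have hb1 : 1 ≤ x := by omega
        have hb2 : x ≤ 49 := by omega
        interval_cases x <;> revert he <;> decide

theorem cntN_le : ∀ (f : Nat) (x : Int), cntN f x ≤ f := by
  intro f
  induction f with
  | zero => intro x; simp [cntN]
  | succ f ih =>
    intro x
    by_cases hs : stepA x = x
    · simp [cntN, hs]
    · simp only [cntN]
      rw [if_neg hs]
      have := ih (stepA x)
      omega

theorem cntN_sound : ∀ (f : Nat) (x : Int), stepA (stepA^[f] x) = stepA^[f] x →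
    (stepA (stepA^[cntN f x] x) = stepA^[cntN f x] x ∧
      ∀ j < cntN f x, stepA (stepA^[j] x) ≠ stepA^[j] x) := by
  intro f
  induction f with
  | zero =>
    intro x h
    exact ⟨h, fun j hj => absurd hj (Nat.not_lt_zero j)⟩
  | succ f ih =>
    intro x h
    by_cases hs : stepA x = x
    · refine ⟨by simp [cntN, hs], ?_⟩
      simp [cntN, hs]
    · have h' : stepA (stepA^[f] (stepA x)) = stepA^[f] (stepA x) := by
        rw [← Function.iterate_succ_apply]; exact h
      obtain ⟨a, c⟩ := ih (stepA x) h'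
      have hc : cntN (f + 1) x = cntN f (stepA x) + 1 := by simp [cntN, hs]
      refine ⟨?_, ?_⟩
      · rw [hc, Function.iterate_succ_apply]; exact a
      · intro j hj
        cases j with
        | zero => simpa using hs
        | succ j =>
          rw [Function.iterate_succ_apply]
          exact c j (by rw [hc] at hj; omega)

theorem elem_stable (x : Int) (hx : elemPre x) :
    stepA (stepA^[cnt x] x) = stepA^[cnt x] x ∧
      ∀ j < cnt x, stepA (stepA^[j] x) ≠ stepA^[j] x := by
  apply cntN_sound
  have h5 := L5 x hx
  have h6 := stable_persist x 5 h5 1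
  rw [show (5 + 1 : Nat) = 6 from rfl] at h6
  rw [h6]
  exact h5

theorem stepsB_succ (f : Nat) (n c : Int) :
    stepsB (f + 1) n c = if stepA n = n then c else stepsB f (stepA n) (c + 1) := rfl

theorem stepsB_run : ∀ (k : Nat) (f : Nat) (x : Int) (c : Int),
    stepA (stepA^[k] x) = stepA^[k] x →
    (∀ j < k, stepA (stepA^[j] x) ≠ stepA^[j] x) →
    k ≤ f → stepsB f x c = c + (k : Int) := by
  intro k
  induction k with
  | zero =>
    intro f x c h _ _
    simp only [Function.iterate_zero, id_eq] at h
    cases f with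
    | zero => simp [stepsB]
    | succ f => rw [stepsB_succ, if_pos h]; simp
  | succ k ih =>
    intro f x c h hmin hf
    cases f with
    | zero => omega
    | succ f =>
      have h0 : stepA x ≠ x := by simpa using hmin 0 (by omega)
      rw [stepsB_succ, if_neg h0]
      have h' : stepA (stepA^[k] (stepA x)) = stepA^[k] (stepA x) := by
        rw [← Function.iterate_succ_apply]; exact h
      have hmin' : ∀ j < k, stepA (stepA^[j] (stepA x)) ≠ stepA^[j] (stepA x) := by
        intro j hj
        rw [← Function.iterate_succ_apply]
        exact hmin (j + 1) (by omega)
      rw [ih f (stepA x) (c + 1) h' hmin' (by omega)]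
      push_cast; ring

theorem foldl_max_ge_acc : ∀ (l : List Int) (a : Nat),
    a ≤ l.foldl (fun b x => max b (cnt x)) a := by
  intro l
  induction l with
  | nil => intro a; simp
  | cons y l ih =>
    intro a
    calc a ≤ max a (cnt y) := le_max_left _ _
    _ ≤ _ := ih _

theorem foldl_max_mem : ∀ (l : List Int) (a : Nat), ∀ x ∈ l,
    cnt x ≤ l.foldl (fun b x => max b (cnt x)) a := by
  intro l
  induction l with
  | nil => intro a x hx; simp at hx
  | cons y l ih =>
    intro a x hx
    rcases List.mem_cons.mp hx with h | h
    · subst h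
      calc cnt x ≤ max a (cnt x) := le_max_right _ _
      _ ≤ _ := foldl_max_ge_acc l _
    · exact ih _ x h

theorem foldl_max_cases : ∀ (l : List Int) (a : Nat),
    l.foldl (fun b x => max b (cnt x)) a = a ∨
      ∃ x ∈ l, l.foldl (fun b x => max b (cnt x)) a = cnt x := by
  intro l
  induction l with
  | nil => intro a; left; rfl
  | cons y l ih =>
    intro a
    rcases ih (max a (cnt y)) with h | h
    · rcases Nat.le_total a (cnt y) with hle | hle
      · right
        exact ⟨y, List.mem_cons_self .., by
          simpa [Nat.max_eq_right hle] using h⟩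
      · left
        simpa [Nat.max_eq_left hle] using h
    · right
      obtain ⟨x, hx, he⟩ := h
      exact ⟨x, List.mem_cons_of_mem _ hx, he⟩

theorem foldl_max_le_6 : ∀ (l : List Int) (a : Nat), a ≤ 6 →
    l.foldl (fun b x => max b (cnt x)) a ≤ 6 := by
  intro l
  induction l with
  | nil => intro a ha; simpa
  | cons y l ih =>
    intro a ha
    exact ih _ (by have := cntN_le 6 y; simp [cnt]; omega)

theorem KN_exists (arr : List Int) (j : Nat) (hj : j < KN arr) :
    ∃ x ∈ arr, j < cnt x := by
  rcases foldl_max_cases arr 0 with h | h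
  · exfalso; unfold KN at hj; omega
  · obtain ⟨x, hx, he⟩ := h
    exact ⟨x, hx, by unfold KN at hj; omega⟩

theorem loopA_run : ∀ (f j : Nat) (arr : List Int) (ans : Int),
    (∀ x ∈ arr, elemPre x) → j ≤ KN arr → KN arr < f + j →
    loopA f (arr.map (stepA^[j])) (arr.map (stepA^[j])) ans = ans + ((KN arr - j : Nat) : Int) := by
  intro f
  induction f with
  | zero => intro j arr ans _ h1 h2; omega
  | succ f ih =>
    intro j arr ans hpre h1 h2
    have hmap : (arr.map (stepA^[j])).map stepA = arr.map (stepA^[j + 1]) := by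
      rw [List.map_map]
      apply List.map_congr_left
      intro x _
      simp [Function.iterate_succ_apply']
    by_cases heq : j = KN arr
    · have hstable : arr.map (stepA^[j]) = arr.map (stepA^[j + 1]) := by
        rw [List.map_eq_map_iff]
        intro x hx
        have hc := foldl_max_mem arr 0 x hx
        have hs := (elem_stable x (hpre x hx)).1
        have e1 : stepA^[j] x = stepA^[cnt x] x := by
          rw [show j = cnt x + (j - cnt x) by unfold KN at heq; omega]
          exact stable_persist x (cnt x) hs (j - cnt x)
        have e2 : stepA^[j + 1] x = stepA^[cnt x] x := by
          rw [show j + 1 = cnt x + (j + 1 - cnt x) by unfold KN at heq; omega]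
          exact stable_persist x (cnt x) hs (j + 1 - cnt x)
        rw [e1, e2]
      rw [loopA, hmap, if_pos hstable]
      simp [← heq]
    · have hjlt : j < KN arr := by omega
      obtain ⟨x, hx, hcx⟩ := KN_exists arr j hjlt
      have hne : arr.map (stepA^[j]) ≠ arr.map (stepA^[j + 1]) := by
        intro hcon
        rw [List.map_eq_map_iff] at hcon
        have hcx2 := hcon x hx
        rw [Function.iterate_succ_apply'] at hcx2
        exact (elem_stable x (hpre x hx)).2 j hcx hcx2.symm
      rw [loopA, hmap, if_neg hne, ih (j + 1) arr (ans + 1) hpre (by omega) (by omega)]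
      omega

theorem alt_fold : ∀ (l : List Int) (a : Nat), (∀ x ∈ l, elemPre x) →
    l.foldl (fun best num => max best (stepsB 64 num 0)) ((a : Nat) : Int) =
      ((l.foldl (fun b x => max b (cnt x)) a : Nat) : Int) := by
  intro l
  induction l with
  | nil => intro a _; rfl
  | cons y l ih =>
    intro a hall
    have hy : stepsB 64 y 0 = ((cnt y : Nat) : Int) := by
      obtain ⟨h1, h2⟩ := elem_stable y (hall y (List.mem_cons_self ..))
      have hb := stepsB_run (cnt y) 64 y 0 h1 h2
        (by have := cntN_le 6 y; simp only [cnt] at *; omega)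
      simpa using hb
    rw [List.foldl_cons, List.foldl_cons, hy, ← Nat.cast_max]
    exact ih (max a (cnt y)) (fun x hx => hall x (List.mem_cons_of_mem _ hx))

-- ===== VERDICT =====
theorem solution_spec : Claim_equal_solution := by
  intro arr _ hpre
  unfold Spec_solution solution solution_alt
  have hpre' : ∀ x ∈ arr, elemPre x := hpre
  have hKN : KN arr ≤ 6 := foldl_max_le_6 arr 0 (by omega)
  have hA := loopA_run 64 0 arr 0 hpre' (Nat.zero_le _) (by omega)
  simp only [Function.iterate_zero, List.map_id_fun, id_eq] at hA
  rw [hA]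
  have hB := alt_fold arr 0 hpre'
  simp only [Nat.cast_zero] at hB
  rw [hB]
  simp [KN]
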